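-- pv_equiv track=rewrite | github.com/krimeano/aoc2020 | day20/solution20.py | rotate_rows
-- ===== SOURCE A (Python) =====
-- def rotate_rows(rows, rotations=0):
--     rotations = rotations % 4
--     if not rotations:
--         return rows
--     if rotations == 2:
--         return [x[::-1] for x in rows[::-1]]
--     out = ['' for x in rows[0]]
--     if rotations == 1:
--         for ix in range(len(rows)):
--             for jy in range(len(rows[ix])):
--                 out[-jy - 1] += rows[ix][jy]
--     else:
--         for ix in range(len(rows)):
--             for jy in range(len(rows[ix])):
--                 out[jy] = rows[ix][jy] + out[jy]
--     return out
-- ===== SOURCE B (Python) =====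
-- def rotate_rows(rows, rotations=0):
--     rotations %= 4
--     if rotations == 0:
--         return rows
--     if rotations == 2:
--         return [x[::-1] for x in rows[::-1]]
--     cols = [''.join(r[j] for r in rows if j < len(r)) for j in range(len(rows[0]))]
--     if rotations == 1:
--         return cols[::-1]
--     return [c[::-1] for c in cols]
-- ===== Notes on version B (the rewrite author's own statement) =====
-- stated objective: simpler
-- what changed: B replaces A's index-by-index double loop that grows each output string in place with += / string prepend by a column-wise transpose: each output line is produced as one ''.join over the rows that reach that column; quarter-turn results are the joined columns reversed (as a list for 90 deg, per string for 270 deg).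
import Mathlib
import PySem

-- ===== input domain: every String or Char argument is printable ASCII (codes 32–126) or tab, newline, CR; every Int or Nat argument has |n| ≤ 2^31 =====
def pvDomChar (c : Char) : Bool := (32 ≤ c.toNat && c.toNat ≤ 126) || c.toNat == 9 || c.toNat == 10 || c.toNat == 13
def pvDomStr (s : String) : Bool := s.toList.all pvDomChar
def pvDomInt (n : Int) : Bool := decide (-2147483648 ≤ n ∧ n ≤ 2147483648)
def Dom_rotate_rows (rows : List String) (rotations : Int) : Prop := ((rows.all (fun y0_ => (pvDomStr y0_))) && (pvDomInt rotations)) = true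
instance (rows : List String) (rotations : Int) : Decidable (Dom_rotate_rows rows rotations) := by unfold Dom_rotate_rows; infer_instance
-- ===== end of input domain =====

-- B rotates the grid by building each output line as one column-wise join, instead of A's
-- per-character `out[...] += c` / `c + out[...]` accumulation into a list of growing strings.

-- ===== PORT A =====
-- one `out[-jy-1] += rows[ix][jy]` step of A's rotation-1 loop (p = (rows[ix][jy], jy); the negative
-- index -jy-1 is position len(out)-1-jy, exact whenever jy < len(out), i.e. on all of Pre_)
def pvStep1 (o : List (List Char)) (p : Char × Nat) : List (List Char) :=
  o.set (o.length - 1 - p.2) ((o.getD (o.length - 1 - p.2) []) ++ [p.1])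

-- one `out[jy] = rows[ix][jy] + out[jy]` step of A's rotation-3 loop (exact whenever jy < len(out))
def pvStep3 (o : List (List Char)) (p : Char × Nat) : List (List Char) :=
  o.set p.2 (p.1 :: (o.getD p.2 []))

def rotate_rows (rows : List String) (rotations : Int) : List String :=
  let r := PySem.Int.mod rotations 4
  if r = 0 then rows
  else if r = 2 then (rows.reverse).map (fun x => String.ofList x.toList.reverse)  -- [x[::-1] for x in rows[::-1]]
  else
    let rs := rows.map String.toList
    let init : List (List Char) := (rs.headD []).map (fun _ => ([] : List Char))  -- ['' for x in rows[0]]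
    let out :=
      if r = 1 then rs.foldl (fun o row => (row.zipIdx).foldl pvStep1 o) init
      else rs.foldl (fun o row => (row.zipIdx).foldl pvStep3 o) init
    out.map String.ofList

-- ===== PORT B =====
def rotate_rows_alt (rows : List String) (rotations : Int) : List String :=
  let r := PySem.Int.mod rotations 4
  if r = 0 then rows
  else if r = 2 then (rows.reverse).map (fun x => String.ofList x.toList.reverse)
  else
    let rs := rows.map String.toList
    -- [''.join(r[j] for r in rows if j < len(r)) for j in range(len(rows[0]))]
    let cols := (List.range ((rs.headD []).length)).map
      (fun j => String.ofList ((rs.filter (fun r => decide (j < r.length))).map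
        (fun r => r.getD j ' ')))
    if r = 1 then cols.reverse
    else cols.map (fun c => String.ofList c.toList.reverse)

-- ===== PRECONDITION & SPEC =====
-- Pre_ excludes exactly the inputs where A raises IndexError on a quarter turn
-- (rotations % 4 ∈ {1,3}): empty `rows` (rows[0]), or some row longer than the first row
-- (the write index jy then falls outside `out`). B returns a value there, so those inputs
-- are excluded rather than matched.
def Pre_rotate_rows (rows : List String) (rotations : Int) : Prop :=
  PySem.Int.mod rotations 4 = 0 ∨ PySem.Int.mod rotations 4 = 2 ∨
    (rows ≠ [] ∧ ∀ s ∈ rows, s.toList.length ≤ (rows.headD "").toList.length)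
instance (rows : List String) (rotations : Int) : Decidable (Pre_rotate_rows rows rotations) := by
  unfold Pre_rotate_rows; infer_instance

def pvWitness_rotate_rows : List String × Int := (["ab", "cd"], 1)

def Spec_rotate_rows (rows : List String) (rotations : Int) (out : List String) : Prop :=
  out = rotate_rows_alt rows rotations
instance (rows : List String) (rotations : Int) (out : List String) : Decidable (Spec_rotate_rows rows rotations out) := by
  unfold Spec_rotate_rows; infer_instance

-- ===== CLAIM (what is proved, stated in full; the proofs are below) =====
def Claim_equal_rotate_rows : Prop := ∀ (rows : List String) (rotations : Int), Dom_rotate_rows rows rotations → Pre_rotate_rows rows rotations → Spec_rotate_rows rows rotations (rotate_rows rows rotations)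

-- ===== LEMMAS AND PROOFS =====

-- getD through List.set (local convenience: all our buffers default to [])
lemma pvGetD_set (o : List (List Char)) (i k : Nat) (v : List Char) :
    (o.set i v).getD k [] = if i = k ∧ i < o.length then v else o.getD k [] := by
  simp only [List.getD_eq_getElem?_getD, List.getElem?_set]
  by_cases h1 : i = k
  · subst h1
    by_cases h2 : i < o.length
    · simp [h2]
    · simp [h2]
  · simp [h1]

-- getD extensionality (the shape every equality below is proved in)
lemma pvExtGetD (l1 l2 : List (List Char)) (h : l1.length = l2.length)
    (hk : ∀ k, k < l1.length → l1.getD k [] = l2.getD k []) : l1 = l2 := by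
  apply List.ext_getElem h
  intro i h1 h2
  have := hk i h1
  rwa [List.getD_eq_getElem _ _ h1, List.getD_eq_getElem _ _ h2] at this

lemma pvGetD_reverse (l : List (List Char)) (k : Nat) (h : k < l.length) :
    l.reverse.getD k [] = l.getD (l.length - 1 - k) [] := by
  rw [List.getD_eq_getElem _ _ (by simpa using h),
      List.getD_eq_getElem _ _ (by omega : l.length - 1 - k < l.length),
      List.getElem_reverse]

lemma pvGetD_range_map (f : Nat → List Char) (m k : Nat) (h : k < m) :
    ((List.range m).map f).getD k [] = f k := by
  rw [List.getD_eq_getElem _ _ (by simpa using h), List.getElem_map, List.getElem_range]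

-- A's rotation-1 inner loop over one row: length is preserved …
lemma len_foldl_step1 (row : List Char) : ∀ (off : Nat) (o : List (List Char)),
    ((row.zipIdx off).foldl pvStep1 o).length = o.length := by
  induction row with
  | nil => intro off o; simp
  | cons c row ih =>
      intro off o
      simp only [List.zipIdx_cons, List.foldl_cons]
      rw [ih]
      simp [pvStep1]

-- … and entry k gets row[len(out)-1-k-off] appended exactly when position len(out)-1-k is hit
lemma getD_foldl_step1 (row : List Char) : ∀ (off : Nat) (o : List (List Char)) (k : Nat),
    off + row.length ≤ o.length → k < o.length →
    ((row.zipIdx off).foldl pvStep1 o).getD k [] =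
      if k + off < o.length ∧ o.length - 1 - k - off < row.length then
        o.getD k [] ++ [row.getD (o.length - 1 - k - off) ' ']
      else o.getD k [] := by
  induction row with
  | nil =>
      intro off o k h hk
      simp only [List.zipIdx_nil, List.foldl_nil]
      rw [if_neg (by rintro ⟨-, h'⟩; simp at h')]
  | cons c row ih =>
      intro off o k h hk
      simp only [List.length_cons] at h ⊢
      simp only [List.zipIdx_cons, List.foldl_cons]
      have hlen : (pvStep1 o (c, off)).length = o.length := by simp [pvStep1]
      have hoff : off < o.length := by omega
      rw [ih (off + 1) (pvStep1 o (c, off)) k (by simp only [hlen]; omega)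
            (by simp only [hlen]; omega), hlen]
      have hget : (pvStep1 o (c, off)).getD k [] =
          if o.length - 1 - off = k ∧ o.length - 1 - off < o.length then
            o.getD (o.length - 1 - off) [] ++ [c] else o.getD k [] := by
        simp only [pvStep1]
        exact pvGetD_set o (o.length - 1 - off) k _
      by_cases hke : k = o.length - 1 - off
      · rw [if_neg (show ¬ (k + (off + 1) < o.length ∧
              o.length - 1 - k - (off + 1) < row.length) from by rintro ⟨h', -⟩; omega),
            hget,
            if_pos (show o.length - 1 - off = k ∧ o.length - 1 - off < o.length from
              ⟨hke.symm, by omega⟩),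
            if_pos (show k + off < o.length ∧ o.length - 1 - k - off < row.length + 1 from
              by omega),
            hke]
        rw [show o.length - 1 - (o.length - 1 - off) - off = 0 from by omega,
            List.getD_cons_zero]
      · by_cases hlt : k + (off + 1) < o.length ∧ o.length - 1 - k - (off + 1) < row.length
        · rw [if_pos hlt, hget,
              if_neg (show ¬ (o.length - 1 - off = k ∧ o.length - 1 - off < o.length) from
                by rintro ⟨h', -⟩; omega),
              if_pos (show k + off < o.length ∧ o.length - 1 - k - off < row.length + 1 from
                by omega)]
          rw [show o.length - 1 - k - off = (o.length - 1 - k - (off + 1)) + 1 from by omega,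
              List.getD_cons_succ]
        · rw [if_neg hlt, hget,
              if_neg (show ¬ (o.length - 1 - off = k ∧ o.length - 1 - off < o.length) from
                by rintro ⟨h', -⟩; omega),
              if_neg (show ¬ (k + off < o.length ∧ o.length - 1 - k - off < row.length + 1) from
                by omega)]

lemma len_foldl_step3 (row : List Char) : ∀ (off : Nat) (o : List (List Char)),
    ((row.zipIdx off).foldl pvStep3 o).length = o.length := by
  induction row with
  | nil => intro off o; simp
  | cons c row ih =>
      intro off o
      simp only [List.zipIdx_cons, List.foldl_cons]
      rw [ih]
      simp [pvStep3]

lemma getD_foldl_step3 (row : List Char) : ∀ (off : Nat) (o : List (List Char)) (k : Nat),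
    off + row.length ≤ o.length → k < o.length →
    ((row.zipIdx off).foldl pvStep3 o).getD k [] =
      if off ≤ k ∧ k - off < row.length then row.getD (k - off) ' ' :: o.getD k []
      else o.getD k [] := by
  induction row with
  | nil =>
      intro off o k h hk
      simp only [List.zipIdx_nil, List.foldl_nil]
      rw [if_neg (by rintro ⟨-, h'⟩; simp at h')]
  | cons c row ih =>
      intro off o k h hk
      simp only [List.length_cons] at h ⊢
      simp only [List.zipIdx_cons, List.foldl_cons]
      have hlen : (pvStep3 o (c, off)).length = o.length := by simp [pvStep3]
      rw [ih (off + 1) (pvStep3 o (c, off)) k (by simp only [hlen]; omega)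
            (by simp only [hlen]; omega)]
      have hget : (pvStep3 o (c, off)).getD k [] =
          if off = k ∧ off < o.length then c :: o.getD off [] else o.getD k [] := by
        simp only [pvStep3]
        exact pvGetD_set o off k _
      by_cases hke : k = off
      · subst hke
        rw [if_neg (show ¬ (k + 1 ≤ k ∧ k - (k + 1) < row.length) from by rintro ⟨h', -⟩; omega),
            hget,
            if_pos (show k = k ∧ k < o.length from ⟨rfl, by omega⟩),
            if_pos (show k ≤ k ∧ k - k < row.length + 1 from by omega)]
        rw [show k - k = 0 from by omega, List.getD_cons_zero]
      · by_cases hle : off + 1 ≤ k ∧ k - (off + 1) < row.length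
        · rw [if_pos hle, hget,
              if_neg (show ¬ (off = k ∧ off < o.length) from by rintro ⟨h', -⟩; omega),
              if_pos (show off ≤ k ∧ k - off < row.length + 1 from by omega)]
          rw [show k - off = (k - (off + 1)) + 1 from by omega, List.getD_cons_succ]
        · rw [if_neg hle, hget,
              if_neg (show ¬ (off = k ∧ off < o.length) from by rintro ⟨h', -⟩; omega),
              if_neg (show ¬ (off ≤ k ∧ k - off < row.length + 1) from by omega)]

-- A's rotation-1 outer loop: entry k accumulates column (len(out)-1-k), row by row, skipping
-- the rows that are too short to reach that column
lemma outer1_spec : ∀ (rs : List (List Char)) (o : List (List Char)),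
    (∀ r ∈ rs, r.length ≤ o.length) →
    (rs.foldl (fun o row => (row.zipIdx).foldl pvStep1 o) o).length = o.length ∧
    ∀ k, k < o.length →
      (rs.foldl (fun o row => (row.zipIdx).foldl pvStep1 o) o).getD k [] =
        o.getD k [] ++ (rs.filter (fun r => decide (o.length - 1 - k < r.length))).map
          (fun r => r.getD (o.length - 1 - k) ' ') := by
  intro rs
  induction rs with
  | nil => intro o h; exact ⟨rfl, by intro k hk; simp⟩
  | cons row rs ih =>
      intro o h
      simp only [List.foldl_cons]
      have hrow : row.length ≤ o.length := h row (by simp)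
      have h1 : ((row.zipIdx).foldl pvStep1 o).length = o.length := len_foldl_step1 row 0 o
      have hrs : ∀ r ∈ rs, r.length ≤ ((row.zipIdx).foldl pvStep1 o).length := by
        intro r hr; rw [h1]; exact h r (by simp [hr])
      obtain ⟨ihlen, ihget⟩ := ih ((row.zipIdx).foldl pvStep1 o) hrs
      refine ⟨by rw [ihlen, h1], ?_⟩
      intro k hk
      rw [ihget k (by rw [h1]; exact hk), h1]
      have hstep := getD_foldl_step1 row 0 o k (by omega) hk
      simp only [Nat.add_zero, Nat.sub_zero] at hstep
      by_cases hc : o.length - 1 - k < row.length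
      · rw [if_pos ⟨hk, hc⟩] at hstep
        rw [hstep, List.filter_cons, if_pos (by simpa using hc)]
        simp [List.append_assoc]
      · rw [if_neg (by rintro ⟨-, h'⟩; exact hc h')] at hstep
        rw [hstep, List.filter_cons, if_neg (by simpa using hc)]

-- A's rotation-3 outer loop: entry k accumulates column k reversed (each row is prepended),
-- skipping the rows that are too short to reach that column
lemma outer3_spec : ∀ (rs : List (List Char)) (o : List (List Char)),
    (∀ r ∈ rs, r.length ≤ o.length) →
    (rs.foldl (fun o row => (row.zipIdx).foldl pvStep3 o) o).length = o.length ∧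
    ∀ k, k < o.length →
      (rs.foldl (fun o row => (row.zipIdx).foldl pvStep3 o) o).getD k [] =
        ((rs.filter (fun r => decide (k < r.length))).map (fun r => r.getD k ' ')).reverse ++
          o.getD k [] := by
  intro rs
  induction rs with
  | nil => intro o h; exact ⟨rfl, by intro k hk; simp⟩
  | cons row rs ih =>
      intro o h
      simp only [List.foldl_cons]
      have hrow : row.length ≤ o.length := h row (by simp)
      have h1 : ((row.zipIdx).foldl pvStep3 o).length = o.length := len_foldl_step3 row 0 o
      have hrs : ∀ r ∈ rs, r.length ≤ ((row.zipIdx).foldl pvStep3 o).length := by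
        intro r hr; rw [h1]; exact h r (by simp [hr])
      obtain ⟨ihlen, ihget⟩ := ih ((row.zipIdx).foldl pvStep3 o) hrs
      refine ⟨by rw [ihlen, h1], ?_⟩
      intro k hk
      rw [ihget k (by rw [h1]; exact hk)]
      have hstep := getD_foldl_step3 row 0 o k (by omega) hk
      simp only [Nat.sub_zero] at hstep
      by_cases hc : k < row.length
      · rw [if_pos ⟨Nat.zero_le k, hc⟩] at hstep
        rw [hstep, List.filter_cons, if_pos (by simpa using hc)]
        simp [List.append_assoc]
      · rw [if_neg (by rintro ⟨-, h'⟩; exact hc h')] at hstep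
        rw [hstep, List.filter_cons, if_neg (by simpa using hc)]

-- ===== VERDICT (by name: the statement is the Claim_ definition above) =====
theorem rotate_rows_spec : Claim_equal_rotate_rows := by
  intro rows rotations _ hpre
  unfold Spec_rotate_rows rotate_rows rotate_rows_alt
  by_cases h0 : PySem.Int.mod rotations 4 = 0
  · simp only [h0, if_pos]
  by_cases h2 : PySem.Int.mod rotations 4 = 2
  · simp only [h2, if_pos]
  simp only [if_neg h0, if_neg h2]
  obtain ⟨hne, hrect⟩ := (hpre.resolve_left h0).resolve_left h2
  obtain ⟨s0, rows', rfl⟩ : ∃ s0 rows', rows = s0 :: rows' := by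
    cases rows with
    | nil => exact absurd rfl hne
    | cons a l => exact ⟨a, l, rfl⟩
  simp only [List.map_cons, List.headD_cons]
  have hrsrect : ∀ r ∈ s0.toList :: rows'.map String.toList, r.length ≤ s0.toList.length := by
    intro r hr
    simp only [List.mem_cons, List.mem_map] at hr
    rcases hr with rfl | ⟨s, hs, rfl⟩
    · exact le_refl _
    · have := hrect s (by simp [hs])
      simpa using this
  have hinitlen : (s0.toList.map (fun _ => ([] : List Char))).length = s0.toList.length := by simp
  have hinitget : ∀ k, k < s0.toList.length →
      (s0.toList.map (fun _ => ([] : List Char))).getD k [] = [] := by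
    intro k hk
    rw [List.map_const', List.getD_replicate _ hk]
  by_cases h1 : PySem.Int.mod rotations 4 = 1
  · simp only [h1, if_pos]
    have hBeq : ((List.range s0.toList.length).map (fun j => String.ofList
          (((s0.toList :: rows'.map String.toList).filter (fun r => decide (j < r.length))).map
            (fun r => r.getD j ' ')))).reverse =
        (((List.range s0.toList.length).map (fun j =>
          (((s0.toList :: rows'.map String.toList).filter (fun r => decide (j < r.length))).map
            (fun r => r.getD j ' ')))).reverse).map String.ofList := by
      simp [List.map_reverse, List.map_map, Function.comp]
    rw [hBeq]
    apply congrArg (List.map String.ofList)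
    obtain ⟨hAlen, hAget⟩ := outer1_spec (s0.toList :: rows'.map String.toList)
      (s0.toList.map (fun _ => ([] : List Char)))
      (by intro r hr; rw [hinitlen]; exact hrsrect r hr)
    apply pvExtGetD
    · rw [hAlen, hinitlen, List.length_reverse, List.length_map, List.length_range]
    · intro k hk
      rw [hAlen, hinitlen] at hk
      rw [hAget k (by rw [hinitlen]; exact hk), hinitlen, hinitget k hk, List.nil_append]
      rw [pvGetD_reverse _ k (by simpa using hk)]
      rw [List.length_map, List.length_range,
          pvGetD_range_map _ _ _ (by omega : s0.toList.length - 1 - k < s0.toList.length)]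
  · simp only [if_neg h1]
    have hBeq : ((List.range s0.toList.length).map (fun j => String.ofList
          (((s0.toList :: rows'.map String.toList).filter (fun r => decide (j < r.length))).map
            (fun r => r.getD j ' ')))).map (fun c => String.ofList c.toList.reverse) =
        ((List.range s0.toList.length).map (fun j =>
          ((((s0.toList :: rows'.map String.toList).filter (fun r => decide (j < r.length))).map
            (fun r => r.getD j ' '))).reverse)).map String.ofList := by
      simp [List.map_map, Function.comp, String.toList_ofList]
    rw [hBeq]
    apply congrArg (List.map String.ofList)
    obtain ⟨hAlen, hAget⟩ := outer3_spec (s0.toList :: rows'.map String.toList)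
      (s0.toList.map (fun _ => ([] : List Char)))
      (by intro r hr; rw [hinitlen]; exact hrsrect r hr)
    apply pvExtGetD
    · rw [hAlen, hinitlen, List.length_map, List.length_range]
    · intro k hk
      rw [hAlen, hinitlen] at hk
      rw [hAget k (by rw [hinitlen]; exact hk), hinitget k hk, List.append_nil]
      rw [pvGetD_range_map _ _ _ hk]
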